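-- pv_equiv track=rewrite | github.com/raymondEDS/yolov4-deepsort | object_location_sort_detection.py | sort_two_dict_by_elements
-- ===== SOURCE A (Python) =====
-- def sort_two_dict_by_elements(size_dict,loc_dict):
--
--     sorted_size = sorted(size_dict.values(),reverse=True) #sort dict of your object order by size
--
--     sorted_object_size_dict = {} #this is the order you want your objects in
--     for i in sorted_size:
--         for k in size_dict.keys():
--             if size_dict[k] == i:
--                 sorted_object_size_dict[k] = size_dict[k]
--                 break
--
--     sort_by_location = sorted(loc_dict.values(),reverse=True) #sort dict into order of which object occur on screen
--
--     object_location_dict = {} #this is the order your objects are in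
--
--     for i in sort_by_location:
--         for k in loc_dict.keys():
--             if loc_dict[k] == i:
--                 object_location_dict[k] = loc_dict[k]
--                 break
--
--
--     if list(object_location_dict.keys()) == list(sorted_object_size_dict.keys()):
--         return True
--     else:
--         return False
-- ===== SOURCE B (Python) =====
-- def sort_two_dict_by_elements(size_dict, loc_dict):
--     def order(d):
--         first = {}  # value -> first key carrying it
--         for k, v in d.items():
--             if v not in first:
--                 first[v] = k
--         return [first[v] for v in sorted(first, reverse=True)]
--     return order(size_dict) == order(loc_dict)
-- ===== Notes on version B (the rewrite author's own statement) =====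
-- stated objective: faster
-- what changed: A rescans the whole key list once per entry of the duplicate-laden descending value list (quadratic nested scans); B makes one grouping pass building a value-to-first-key dict, sorts only the distinct values once, and maps them back to keys.
import Mathlib
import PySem

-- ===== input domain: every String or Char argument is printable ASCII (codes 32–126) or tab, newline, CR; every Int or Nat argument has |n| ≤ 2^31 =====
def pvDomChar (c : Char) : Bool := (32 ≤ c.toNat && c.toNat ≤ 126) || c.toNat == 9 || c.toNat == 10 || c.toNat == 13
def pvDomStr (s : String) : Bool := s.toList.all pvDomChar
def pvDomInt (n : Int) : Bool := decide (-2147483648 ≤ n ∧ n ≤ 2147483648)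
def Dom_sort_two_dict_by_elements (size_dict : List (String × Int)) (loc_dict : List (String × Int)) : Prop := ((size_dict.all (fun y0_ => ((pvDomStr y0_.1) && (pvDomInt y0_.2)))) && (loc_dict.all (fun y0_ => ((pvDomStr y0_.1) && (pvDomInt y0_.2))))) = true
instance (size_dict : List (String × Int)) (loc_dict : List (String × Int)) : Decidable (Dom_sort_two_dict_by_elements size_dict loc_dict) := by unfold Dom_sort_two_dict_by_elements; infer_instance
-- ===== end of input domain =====

-- B replaces A's quadratic rescans (for each sorted value, rescan all keys for the first match)
-- by one grouping pass value→first key followed by one sort of the distinct values: objective faster.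

-- ===== PORT A =====
-- A's inner loop 'for k in d.keys(): if d[k] == i: out[k] = d[k]; break'.
-- d[k] with k drawn from d.keys() never raises, so 'getD k 0' is exact here.
def pvInnerA (d : PySem.Dict String Int) (ks : List String) (i : Int)
    (acc : PySem.Dict String Int) : PySem.Dict String Int :=
  match ks with
  | [] => acc
  | k :: rest =>
      if d.getD k 0 == i then acc.insert k (d.getD k 0) else pvInnerA d rest i acc

def sort_two_dict_by_elements (size_dict : List (String × Int)) (loc_dict : List (String × Int)) : Bool :=
  let size := PySem.Dict.ofList size_dict
  let loc := PySem.Dict.ofList loc_dict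
  let sorted_size := PySem.List.sorted size.values (fun x => x) true
  let sorted_object_size_dict :=
    sorted_size.foldl (fun acc i => pvInnerA size size.keys i acc) PySem.Dict.empty
  let sort_by_location := PySem.List.sorted loc.values (fun x => x) true
  let object_location_dict :=
    sort_by_location.foldl (fun acc i => pvInnerA loc loc.keys i acc) PySem.Dict.empty
  decide (object_location_dict.keys = sorted_object_size_dict.keys)

-- ===== PORT B =====
-- B's helper 'order': one pass building first : value -> first key, then the distinct
-- values sorted descending, mapped back to their keys. first[v] never raises (v is a key),
-- so 'getD v ""' is exact here.
def pvOrderB (d : PySem.Dict String Int) : List String :=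
  let first := d.items.foldl
    (fun f kv => if f.contains kv.2 then f else f.insert kv.2 kv.1) PySem.Dict.empty
  (PySem.List.sorted first.keys (fun x => x) true).map (fun v => first.getD v "")

def sort_two_dict_by_elements_alt (size_dict : List (String × Int)) (loc_dict : List (String × Int)) : Bool :=
  decide (pvOrderB (PySem.Dict.ofList size_dict) = pvOrderB (PySem.Dict.ofList loc_dict))

-- ===== PRECONDITION & SPEC =====
def Spec_sort_two_dict_by_elements (size_dict : List (String × Int)) (loc_dict : List (String × Int)) (out : Bool) : Prop := out = sort_two_dict_by_elements_alt size_dict loc_dict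
instance (size_dict : List (String × Int)) (loc_dict : List (String × Int)) (out : Bool) : Decidable (Spec_sort_two_dict_by_elements size_dict loc_dict out) := by unfold Spec_sort_two_dict_by_elements; infer_instance

-- ===== CLAIM (what is proved, stated in full; the proofs are below) =====
def Claim_equal_sort_two_dict_by_elements : Prop := ∀ (size_dict : List (String × Int)) (loc_dict : List (String × Int)), Dom_sort_two_dict_by_elements size_dict loc_dict → Spec_sort_two_dict_by_elements size_dict loc_dict (sort_two_dict_by_elements size_dict loc_dict)

-- ===== LEMMAS AND PROOFS =====

-- 'fk d v': the first key of d whose value is v (default "" when none) — the key both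
-- programs place at position of value v.
def pvFk (d : PySem.Dict String Int) (v : Int) : String :=
  ((d.keys).find? (fun k => d.getD k 0 == v)).getD ""

-- A's inner scan is a find? over the keys.
theorem pvInnerA_eq_find (d : PySem.Dict String Int) (ks : List String) (i : Int)
    (acc : PySem.Dict String Int) :
    pvInnerA d ks i acc =
      match ks.find? (fun k => d.getD k 0 == i) with
      | some k => acc.insert k (d.getD k 0)
      | none => acc := by
  induction ks with
  | nil => simp [pvInnerA]
  | cons k rest ih =>
      by_cases h : d.getD k 0 = i
      · simp [pvInnerA, h]
      · simp [pvInnerA, h, ih]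

theorem pvFk_spec (d : PySem.Dict String Int) (hnd : d.keys.Nodup) {v : Int}
    (hv : v ∈ d.values) :
    d.keys.find? (fun k => d.getD k 0 == v) = some (pvFk d v) ∧ d.getD (pvFk d v) 0 = v := by
  have hex : ∃ k ∈ d.keys, (d.getD k 0 == v) = true := by
    have : v ∈ d.items.map (·.2) := hv
    rcases List.mem_map.1 this with ⟨⟨k, w⟩, hkw, hw⟩
    refine ⟨k, PySem.Dict.mem_keys_of_mem_items d hkw, ?_⟩
    simp only at hw
    subst hw
    simp [PySem.Dict.getD_of_mem_items d hkw hnd 0]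
  have hsome : (d.keys.find? (fun k => d.getD k 0 == v)).isSome := List.find?_isSome.2 hex
  rcases Option.isSome_iff_exists.1 hsome with ⟨k, hk⟩
  have hpk := List.find?_some hk
  constructor
  · simp [pvFk, hk]
  · simp only [pvFk, hk, Option.getD_some]
    exact beq_iff_eq.1 hpk

-- Set.ofList is a sublist (first occurrences, in order).
theorem pvOfList_sublist {α : Type} [BEq α] [LawfulBEq α] (l : List α) :
    (PySem.Set.ofList l).Sublist l := by
  induction l with
  | nil => simp [PySem.Set.ofList_nil]
  | cons x xs ih =>
      rw [PySem.Set.ofList_cons]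
      exact List.Sublist.cons₂ x (List.filter_sublist.trans ih)

-- dedup commutes with an injective-on-the-list map.
theorem pvOfList_map (l : List Int) (f : Int → String)
    (hinj : ∀ a ∈ l, ∀ b ∈ l, f a = f b → a = b) :
    PySem.Set.ofList (l.map f) = (PySem.Set.ofList l).map f := by
  induction l with
  | nil => simp [PySem.Set.ofList_nil]
  | cons x xs ih =>
      have hinj' : ∀ a ∈ xs, ∀ b ∈ xs, f a = f b → a = b := by
        intro a ha b hb; exact hinj a (by simp [ha]) b (by simp [hb])
      rw [List.map_cons, PySem.Set.ofList_cons, PySem.Set.ofList_cons,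
        ih hinj', List.map_cons]
      congr 1
      simp only [PySem.Set.discard, List.filter_map]
      congr 1
      apply List.filter_congr
      intro a ha
      have ha' : a ∈ xs := (pvOfList_sublist xs).subset ha
      simp only [Function.comp_apply]
      by_cases h : a = x
      · simp [h]
      · have : ¬ f a = f x := fun hfe => h (hinj a (by simp [ha']) x (by simp) hfe)
        simp [h, this]

-- B's grouping pass: lookups in the finished 'first' dict.
theorem pvFirst_get? (d : PySem.Dict Int String) (l : List (String × Int)) (v : Int)
    (h : d.contains v = true) :
    (l.foldl (fun f kv => if f.contains kv.2 then f else f.insert kv.2 kv.1) d).get? v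
      = d.get? v := by
  induction l generalizing d with
  | nil => rfl
  | cons kv rest ih =>
      by_cases hc : d.contains kv.2 = true
      · rw [List.foldl_cons, if_pos hc]; exact ih d h
      · rw [List.foldl_cons, if_neg hc]
        have hne : v ≠ kv.2 := by
          intro he; rw [he] at h; exact absurd h (by simp [hc])
        rw [ih _ (by simp [PySem.Dict.contains_insert, h]),
          PySem.Dict.get?_insert_of_ne d kv.1 hne]

theorem pvFirst_get?_none (d : PySem.Dict Int String) (l : List (String × Int)) (v : Int)
    (h : d.contains v = false) :
    (l.foldl (fun f kv => if f.contains kv.2 then f else f.insert kv.2 kv.1) d).get? v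
      = (l.find? (fun kv => kv.2 == v)).map (·.1) := by
  induction l generalizing d with
  | nil =>
      simp only [List.foldl_nil, List.find?_nil, Option.map_none]
      rw [PySem.Dict.contains_eq_isSome_get?] at h
      exact Option.not_isSome_iff_eq_none.1 (by simp [h])
  | cons kv rest ih =>
      by_cases hv : kv.2 = v
      · subst hv
        rw [List.foldl_cons, if_neg (by simp [h])]
        simp only [List.find?_cons, BEq.rfl, Option.map_some]
        rw [pvFirst_get? _ _ _ (by simp),
          PySem.Dict.get?_insert_self]
      · have hfind : ((kv :: rest).find? (fun kv => kv.2 == v))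
            = rest.find? (fun kv => kv.2 == v) := by
          simp [hv]
        by_cases hc : d.contains kv.2 = true
        · rw [List.foldl_cons, if_pos hc, ih d h, hfind]
        · rw [List.foldl_cons, if_neg hc,
            ih _ (by simp [PySem.Dict.contains_insert, h, Ne.symm hv]), hfind]

theorem pvFirst_keys (d : PySem.Dict Int String) (l : List (String × Int)) :
    (l.foldl (fun f kv => if f.contains kv.2 then f else f.insert kv.2 kv.1) d).keys
      = PySem.Set.update d.keys (l.map (·.2)) := by
  induction l generalizing d with
  | nil => rfl
  | cons kv rest ih =>
      by_cases hc : d.contains kv.2 = true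
      · rw [List.foldl_cons, if_pos hc, List.map_cons, PySem.Set.update_cons,
          ih, PySem.Set.add_of_mem ((PySem.Dict.contains_iff_mem_keys _ _).1 hc)]
      · rw [List.foldl_cons, if_neg hc, List.map_cons, PySem.Set.update_cons, ih,
          PySem.Dict.keys_insert_of_not_contains _ _ (Bool.not_eq_true _ ▸ hc),
          PySem.Set.add_of_not_mem (fun hm => by
            simp [(PySem.Dict.contains_iff_mem_keys _ _).2 hm] at hc)]

-- The heart: for a dict with distinct keys, the key order A builds equals B's 'order' list.
theorem pvOrder_eq (d : PySem.Dict String Int) (hnd : d.keys.Nodup) :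
    ((PySem.List.sorted d.values (fun x => x) true).foldl
        (fun acc i => pvInnerA d d.keys i acc) PySem.Dict.empty).keys
      = pvOrderB d := by
  set dv := PySem.List.sorted d.values (fun x => x) true with hdv
  -- A's fold is a fold of plain inserts keyed by pvFk
  have hfold : dv.foldl (fun acc i => pvInnerA d d.keys i acc) PySem.Dict.empty
      = dv.foldl (fun acc i => acc.insert (pvFk d i) i) PySem.Dict.empty := by
    apply PySem.List.foldl_congr_mem
    intro acc i hi
    have hiv : i ∈ d.values := (PySem.List.mem_sorted _ _ _ _).1 hi
    obtain ⟨hfind, hval⟩ := pvFk_spec d hnd hiv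
    rw [pvInnerA_eq_find, hfind]
    simp [hval]
  -- so A's key list is the dedup of dv.map (pvFk d)
  have hAkeys : (dv.foldl (fun acc i => pvInnerA d d.keys i acc) PySem.Dict.empty).keys
      = PySem.Set.ofList (dv.map (pvFk d)) := by
    rw [hfold, PySem.Dict.keys_foldl_insert_key dv (pvFk d) (fun _ i => i) PySem.Dict.empty,
      PySem.Dict.keys_empty, PySem.Set.update_nil_left]
  -- pvFk is injective on d.values
  have hinj : ∀ a ∈ dv, ∀ b ∈ dv, pvFk d a = pvFk d b → a = b := by
    intro a ha b hb he
    have ha' := (pvFk_spec d hnd ((PySem.List.mem_sorted _ _ _ _).1 ha)).2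
    have hb' := (pvFk_spec d hnd ((PySem.List.mem_sorted _ _ _ _).1 hb)).2
    rw [← ha', he, hb']
  -- B's first dict
  have hBkeys : (d.items.foldl
      (fun f kv => if f.contains kv.2 then f else f.insert kv.2 kv.1) PySem.Dict.empty).keys
      = PySem.Set.ofList d.values := by
    rw [pvFirst_keys, PySem.Dict.keys_empty, PySem.Set.update_nil_left]; rfl
  have hBget : ∀ v : Int, (d.items.foldl
      (fun f kv => if f.contains kv.2 then f else f.insert kv.2 kv.1) PySem.Dict.empty).getD v ""
      = pvFk d v := by
    intro v
    rw [PySem.Dict.getD_eq_get?_getD, pvFirst_get?_none _ _ _ (PySem.Dict.contains_empty v),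
      PySem.Dict.items_eq_map_keys d hnd 0, List.find?_map, pvFk]
    simp [Option.map_map, Function.comp_def]
  -- the two sorted distinct-value lists coincide
  have hsortdv : PySem.List.sorted (PySem.Set.ofList d.values) (fun x => x) true
      = PySem.Set.ofList dv := by
    apply PySem.List.sorted_rev_eq_of_perm_of_pairwise_gt
    · exact (List.perm_ext_iff_of_nodup (PySem.Set.nodup_ofList dv)
        (PySem.Set.nodup_ofList d.values)).2 (by
          intro a
          rw [PySem.Set.mem_ofList, PySem.Set.mem_ofList, hdv, PySem.List.mem_sorted])
    · have hsub := pvOfList_sublist dv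
      have hle : (PySem.Set.ofList dv).Pairwise (fun a b : Int => b ≤ a) :=
        (PySem.List.sorted_pairwise_rev d.values (fun x => x)).sublist hsub
      have hne : (PySem.Set.ofList dv).Pairwise (fun a b : Int => a ≠ b) :=
        PySem.Set.nodup_ofList dv
      exact (hle.and hne).imp (fun h => lt_of_le_of_ne h.1 (Ne.symm h.2))
  rw [hAkeys, pvOrderB]
  simp only [hBkeys, hsortdv]
  rw [List.map_congr_left (fun v _ => hBget v),
    pvOfList_map dv (pvFk d) hinj]

-- ===== VERDICT (by name: the statement is the Claim_ definition above) =====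
theorem sort_two_dict_by_elements_spec : Claim_equal_sort_two_dict_by_elements := by
  intro size_dict loc_dict _
  show sort_two_dict_by_elements size_dict loc_dict
      = sort_two_dict_by_elements_alt size_dict loc_dict
  unfold sort_two_dict_by_elements sort_two_dict_by_elements_alt
  simp only
  rw [pvOrder_eq _ (PySem.Dict.nodup_keys_ofList size_dict),
    pvOrder_eq _ (PySem.Dict.nodup_keys_ofList loc_dict)]
  simp [eq_comm]
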